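-- pv_equiv track=rewrite | github.com/ChandanKSahu/MiRAGE | src/mirage/utils/visualize_multihop.py | extract_keywords_from_text
-- ===== SOURCE A (Python) =====
-- from typing import Dict, List, Set
--
-- def extract_keywords_from_text(text: str, keywords: Set[str]) -> List[tuple]:
--     """Find all keyword occurrences in text with positions."""
--     matches = []
--     text_lower = text.lower()
--     for kw in keywords:
--         kw_lower = kw.lower()
--         start = 0
--         while True:
--             pos = text_lower.find(kw_lower, start)
--             if pos == -1:
--                 break
--             matches.append((pos, pos + len(kw), kw))
--             start = pos + 1
--     return sorted(matches, key=lambda x: x[0])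
-- ===== SOURCE B (Python) =====
-- def extract_keywords_from_text(text, keywords):
--     """Find all keyword occurrences in text with positions.
--
--     Position-major single sweep: walk the text once, at each position emit
--     every keyword that starts there (in keyword order), so the result comes
--     out already ordered by position with the same tie-break as a stable sort.
--     """
--     text_lower = text.lower()
--     pairs = [(kw.lower(), kw) for kw in keywords]
--     matches = []
--     for i in range(len(text) + 1):
--         for kw_lower, kw in pairs:
--             if text_lower.startswith(kw_lower, i):
--                 matches.append((i, i + len(kw), kw))
--     return matches
-- ===== Notes on version B (the rewrite author's own statement) =====
-- stated objective: alternative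
-- what changed: A's keyword-major scan (repeated str.find per keyword, then a stable sort of all matches) is replaced by a single position-major sweep over the text that emits each position's matches in keyword order, producing the list already sorted with the same tie-break and no sort step.
import Mathlib
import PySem

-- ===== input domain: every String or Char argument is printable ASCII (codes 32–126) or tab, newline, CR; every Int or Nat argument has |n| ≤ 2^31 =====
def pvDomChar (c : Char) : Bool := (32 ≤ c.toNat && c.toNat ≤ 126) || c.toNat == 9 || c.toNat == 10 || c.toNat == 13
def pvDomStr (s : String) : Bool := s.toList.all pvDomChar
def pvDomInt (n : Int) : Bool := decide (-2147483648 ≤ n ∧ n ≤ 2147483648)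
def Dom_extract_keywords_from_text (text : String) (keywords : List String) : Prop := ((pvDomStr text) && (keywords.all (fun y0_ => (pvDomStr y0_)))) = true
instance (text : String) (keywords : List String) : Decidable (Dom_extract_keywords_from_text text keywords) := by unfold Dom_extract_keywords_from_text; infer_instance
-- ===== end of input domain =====

-- A's keyword-major repeated-find scan plus a final stable sort is replaced in B by a single
-- position-major sweep that emits the matches already in sorted order (no sort); same return value.

-- ===== PORT A =====
-- the `while True: pos = text_lower.find(kw_lower, start) …` loop; fuel = len(text)+2 always suffices
-- because `start` grows by at least 1 per round and find returns -1 once start exceeds len(text)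
def pvKwLoop (tl kl : List Char) (kw : String) : Nat → Int → List (Int × Int × String) → List (Int × Int × String)
  | 0, _, acc => acc
  | fuel + 1, start, acc =>
    let pos := PySem.Chars.findFrom tl kl start
    if pos = -1 then acc
    else pvKwLoop tl kl kw fuel (pos + 1) (acc ++ [(pos, pos + PySem.Str.len kw, kw)])

def extract_keywords_from_text (text : String) (keywords : List String) : List (Int × Int × String) :=
  let text_lower := (PySem.Str.lower text).toList
  let matches_ := keywords.foldl
    (fun acc kw => pvKwLoop text_lower ((PySem.Str.lower kw).toList) kw (text.toList.length + 2) 0 acc) []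
  PySem.List.sorted matches_ (fun x => x.1)

-- ===== PORT B =====
-- `text_lower.startswith(kw_lower, i)` for 0 ≤ i is exactly a prefix test against text_lower[i:]
def extract_keywords_from_text_alt (text : String) (keywords : List String) : List (Int × Int × String) :=
  let text_lower := (PySem.Str.lower text).toList
  let pairs := keywords.map (fun kw => ((PySem.Str.lower kw).toList, kw))
  (PySem.List.pyRange 0 ((text.toList.length : Int) + 1)).foldl
    (fun acc i => pairs.foldl
      (fun acc2 p =>
        if PySem.Chars.startswith (text_lower.drop i.toNat) p.1
        then acc2 ++ [(i, i + PySem.Str.len p.2, p.2)] else acc2) acc) []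

-- ===== PRECONDITION & SPEC =====
def Spec_extract_keywords_from_text (text : String) (keywords : List String) (out : List (Int × Int × String)) : Prop := out = extract_keywords_from_text_alt text keywords
instance (text : String) (keywords : List String) (out : List (Int × Int × String)) : Decidable (Spec_extract_keywords_from_text text keywords out) := by unfold Spec_extract_keywords_from_text; infer_instance

-- ===== CLAIM (what is proved, stated in full; the proofs are below) =====
def Claim_equal_extract_keywords_from_text : Prop := ∀ (text : String) (keywords : List String), Dom_extract_keywords_from_text text keywords → Spec_extract_keywords_from_text text keywords (extract_keywords_from_text text keywords)


-- ===== LEMMAS AND PROOFS =====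

-- the match tuple emitted for keyword kw at position i
def pvEntry (kw : String) (i : Int) : Int × Int × String := (i, i + PySem.Str.len kw, kw)

-- all positions i ∈ [start, |tl|+1) where kl matches tl (tl and kl already lowered)
def pvOcc (tl kl : List Char) (start : Int) : List Int :=
  (PySem.List.pyRange start ((tl.length : Int) + 1)).filter
    (fun i => PySem.Chars.startswith (tl.drop i.toNat) kl)

-- Python quirk: find(sub, start) is -1 once start exceeds len
lemma pv_findFrom_past (tl kl : List Char) (start : Int) (h : (tl.length : Int) < start) :
    PySem.Chars.findFrom tl kl start = -1 := by
  have hn : (0 : Int) ≤ (tl.length : Int) := by positivity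
  simp only [PySem.Chars.findFrom]
  split_ifs <;> omega

-- for 0 ≤ start ≤ len: findFrom is find on the dropped tail
lemma pv_findFrom_eq (tl kl : List Char) (start : Int) (h0 : 0 ≤ start) (h1 : start ≤ (tl.length : Int)) :
    PySem.Chars.findFrom tl kl start =
      (if PySem.Chars.find (tl.drop start.toNat) kl = -1 then -1
       else start + PySem.Chars.find (tl.drop start.toNat) kl) := by
  simp only [PySem.Chars.findFrom]
  have hs : ¬ start < 0 := by omega
  have he : ¬ (tl.length : Int) < start := by omega
  simp [hs, he]

-- a match position i ≥ start makes kl an infix of tl.drop start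
lemma pv_infix_of_startswith (tl kl : List Char) (s i : Nat) (hsi : s ≤ i)
    (hsw : PySem.Chars.startswith (tl.drop i) kl = true) : kl <:+: tl.drop s := by
  rw [PySem.Chars.startswith_iff] at hsw
  have hdr : tl.drop i = (tl.drop s).drop (i - s) := by rw [List.drop_drop]; congr 1; omega
  rw [hdr] at hsw
  exact hsw.isInfix.trans (List.drop_suffix _ _).isInfix

-- the while-loop collects exactly the match positions ≥ start, in ascending order
lemma pv_kwLoop_eq (tl kl : List Char) (kw : String) :
    ∀ (fuel : Nat) (start : Int) (acc : List (Int × Int × String)), 0 ≤ start →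
      tl.length + 2 ≤ fuel + start.toNat →
      pvKwLoop tl kl kw fuel start acc = acc ++ (pvOcc tl kl start).map (pvEntry kw) := by
  intro fuel
  induction fuel with
  | zero =>
    intro start acc h0 hf
    have h1 : (tl.length : Int) + 1 ≤ start := by omega
    simp [pvKwLoop, pvOcc, PySem.List.pyRange_one_eq_nil h1]
  | succ fuel ih =>
    intro start acc h0 hf
    simp only [pvKwLoop]
    by_cases hpast : (tl.length : Int) < start
    · rw [pv_findFrom_past tl kl start hpast]
      simp [pvOcc, PySem.List.pyRange_one_eq_nil (by omega : (tl.length : Int) + 1 ≤ start)]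
    · rw [not_lt] at hpast
      rw [pv_findFrom_eq tl kl start h0 hpast]
      by_cases hneg : PySem.Chars.find (tl.drop start.toNat) kl = -1
      · rw [if_pos hneg]
        have hinfix : ¬ kl <:+: tl.drop start.toNat := by
          rw [← PySem.Chars.find_nonneg_iff]; omega
        have hocc : pvOcc tl kl start = [] := by
          apply List.filter_eq_nil_iff.2
          intro i hi
          rw [PySem.List.mem_pyRange_one] at hi
          simp only [Bool.not_eq_true]
          by_contra hsw
          rw [Bool.not_eq_false] at hsw
          exact hinfix (pv_infix_of_startswith tl kl start.toNat i.toNat (by omega) hsw)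
        simp [hocc]
      · rw [if_neg hneg]
        set r := PySem.Chars.find (tl.drop start.toNat) kl with hrdef
        have hr0 : 0 ≤ r := by
          have := PySem.Chars.neg_one_le_find (tl.drop start.toNat) kl; omega
        have hrlen : r ≤ ((tl.drop start.toNat).length : Int) := PySem.Chars.find_le_length _ _
        have hlen_drop : ((tl.drop start.toNat).length : Int) = (tl.length : Int) - start := by
          rw [List.length_drop]; omega
        obtain ⟨hpre, hmin⟩ := PySem.Chars.find_spec (s := tl.drop start.toNat) (sub := kl) hr0
        have hdr : (tl.drop start.toNat).drop r.toNat = tl.drop (start + r).toNat := by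
          rw [List.drop_drop]; congr 1; omega
        rw [if_neg (by omega : ¬ (start + r = -1))]
        rw [ih (start + r + 1) _ (by omega) (by omega)]
        have hsplit : pvOcc tl kl start = (start + r) :: pvOcc tl kl (start + r + 1) := by
          unfold pvOcc
          rw [PySem.List.pyRange_one_append start (start + r) ((tl.length : Int) + 1) (by omega) (by omega),
              PySem.List.pyRange_one_cons (by omega : start + r < (tl.length : Int) + 1)]
          rw [List.filter_append, List.filter_cons]
          have h1 : (PySem.List.pyRange start (start + r)).filter
              (fun i => PySem.Chars.startswith (tl.drop i.toNat) kl) = [] := by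
            apply List.filter_eq_nil_iff.2
            intro i hi
            rw [PySem.List.mem_pyRange_one] at hi
            simp only [Bool.not_eq_true]
            by_contra hsw
            rw [Bool.not_eq_false] at hsw
            rw [PySem.Chars.startswith_iff] at hsw
            have hdi : tl.drop i.toNat = (tl.drop start.toNat).drop (i.toNat - start.toNat) := by
              rw [List.drop_drop]; congr 1; omega
            rw [hdi] at hsw
            exact hmin (i.toNat - start.toNat) (by omega) hsw
          have h2 : PySem.Chars.startswith (tl.drop (start + r).toNat) kl = true := by
            rw [PySem.Chars.startswith_iff, ← hdr]; exact hpre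
          simp [h1, h2]
        rw [hsplit]
        simp [pvEntry]

-- stability of PySem.List.sorted: elements with a fixed key keep their original order
lemma pv_insertBy_filter (x : Int × Int × String) (L : List (Int × Int × String)) (v : Int)
    (hL : L.Pairwise (fun a b => a.1 ≤ b.1)) :
    (PySem.List.insertBy (fun a b => decide (a.1 < b.1)) x L).filter (fun y => decide (y.1 = v))
      = L.filter (fun y => decide (y.1 = v)) ++ (if x.1 = v then [x] else []) := by
  induction L with
  | nil => by_cases h : x.1 = v <;> simp [PySem.List.insertBy, h]
  | cons y t ih =>
    have hy : ∀ z ∈ t, y.1 ≤ z.1 := (List.pairwise_cons.1 hL).1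
    have ht := (List.pairwise_cons.1 hL).2
    simp only [PySem.List.insertBy]
    by_cases hlt : x.1 < y.1
    · rw [if_pos (by simpa using hlt)]
      by_cases hxv : x.1 = v
      · have hfilt : (y :: t).filter (fun z => decide (z.1 = v)) = [] := by
          apply List.filter_eq_nil_iff.2
          intro z hz
          simp only [decide_eq_true_eq] at *
          rcases List.mem_cons.1 hz with hz | hz
          · subst hz; omega
          · have := hy z hz; omega
        simp [hxv, hfilt]
      · simp [List.filter_cons, hxv]
    · rw [if_neg (by simpa using hlt)]
      rw [List.filter_cons, List.filter_cons, ih ht]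
      by_cases hyv : y.1 = v <;> simp [hyv]

lemma pv_sorted_filter (xs : List (Int × Int × String)) (v : Int) :
    (PySem.List.sorted xs (fun x => x.1)).filter (fun y => decide (y.1 = v))
      = xs.filter (fun y => decide (y.1 = v)) := by
  induction xs using List.reverseRecOn with
  | nil => simp [PySem.List.sorted]
  | append_singleton ys x ih =>
    rw [PySem.List.sorted_eq_foldl_insertBy, List.foldl_append, List.foldl_cons, List.foldl_nil,
        ← PySem.List.sorted_eq_foldl_insertBy]
    rw [pv_insertBy_filter x _ v (PySem.List.sorted_pairwise ys (fun x => x.1)), ih,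
        List.filter_append]
    by_cases h : x.1 = v <;> simp [h]

-- a list weakly sorted by key is determined by its key-fibers
lemma pv_eq_of_filter : ∀ (L1 L2 : List (Int × Int × String)),
    L1.Pairwise (fun a b => a.1 ≤ b.1) → L2.Pairwise (fun a b => a.1 ≤ b.1) →
    (∀ v : Int, L1.filter (fun y => decide (y.1 = v)) = L2.filter (fun y => decide (y.1 = v))) →
    L1 = L2 := by
  intro L1
  induction L1 with
  | nil =>
    intro L2 _ _ h
    cases L2 with
    | nil => rfl
    | cons y t2 => exact absurd (h y.1) (by simp)
  | cons x t1 ih =>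
    intro L2 h1 h2 h
    cases L2 with
    | nil => exact absurd (h x.1) (by simp)
    | cons y t2 =>
      have hx1 : ∀ z ∈ t1, x.1 ≤ z.1 := (List.pairwise_cons.1 h1).1
      have hy1 : ∀ z ∈ t2, y.1 ≤ z.1 := (List.pairwise_cons.1 h2).1
      have hkey : x.1 = y.1 := by
        by_contra hne
        rcases lt_or_gt_of_ne hne with hlt | hgt
        · have hnil : (y :: t2).filter (fun z => decide (z.1 = x.1)) = [] := by
            apply List.filter_eq_nil_iff.2
            intro z hz
            simp only [decide_eq_true_eq]
            rcases List.mem_cons.1 hz with hz | hz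
            · subst hz; omega
            · have := hy1 z hz; omega
          have hc := h x.1
          rw [hnil] at hc
          simp at hc
        · have hnil : (x :: t1).filter (fun z => decide (z.1 = y.1)) = [] := by
            apply List.filter_eq_nil_iff.2
            intro z hz
            simp only [decide_eq_true_eq]
            rcases List.mem_cons.1 hz with hz | hz
            · subst hz; omega
            · have := hx1 z hz; omega
          have hc := h y.1
          rw [hnil] at hc
          simp at hc
      have hc := h x.1
      rw [List.filter_cons, List.filter_cons, if_pos (by simp), if_pos (by simp [← hkey])] at hc
      obtain ⟨hxy, htl⟩ := List.cons_eq_cons.1 hc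
      subst hxy
      congr 1
      apply ih t2 (List.pairwise_cons.1 h1).2 (List.pairwise_cons.1 h2).2
      intro v
      by_cases hv : x.1 = v
      · have hc2 := h v
        rw [List.filter_cons, List.filter_cons, if_pos (by simp [hv]), if_pos (by simp [hv])] at hc2
        exact (List.cons_eq_cons.1 hc2).2
      · have hc2 := h v
        rw [List.filter_cons, List.filter_cons, if_neg (by simp [hv]), if_neg (by simp [hv])] at hc2
        exact hc2

lemma pv_nodup_filter_eq (l : List Int) (v : Int) (h : l.Nodup) :
    l.filter (fun x => decide (x = v)) = if v ∈ l then [v] else [] := by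
  induction l with
  | nil => simp
  | cons x t ih =>
    rw [List.nodup_cons] at h
    by_cases hxv : x = v
    · subst hxv
      have hnil : t.filter (fun z => decide (z = x)) = [] := by
        apply List.filter_eq_nil_iff.2
        intro z hz
        simp only [decide_eq_true_eq]
        intro hzx
        exact h.1 (hzx ▸ hz)
      simp [hnil]
    · simp [hxv, ih h.2, List.mem_cons, Ne.symm hxv]

lemma pv_flatMap_if (ps : List Int) (v : Int) (h : ps.Nodup) (g : Int → List (Int × Int × String)) :
    ps.flatMap (fun i => if i = v then g i else []) = if v ∈ ps then g v else [] := by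
  induction ps with
  | nil => simp
  | cons i t ih =>
    rw [List.nodup_cons] at h
    rw [List.flatMap_cons, ih h.2]
    by_cases hiv : i = v
    · subst hiv
      simp [h.1]
    · simp [hiv, Ne.symm hiv]

lemma pv_flatMap_ite_singleton {α : Type} (l : List String) (p : String → Prop) [DecidablePred p]
    (f : String → α) :
    l.flatMap (fun a => if p a then [f a] else []) = (l.filter (fun a => decide (p a))).map f := by
  induction l with
  | nil => simp
  | cons a t ih => by_cases h : p a <;> simp [h, ih]

lemma pv_pairwise_flatMap (ps : List Int) (g : Int → List (Int × Int × String))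
    (hps : ps.Pairwise (· < ·)) (hg : ∀ i ∈ ps, ∀ x ∈ g i, x.1 = i) :
    (ps.flatMap g).Pairwise (fun a b => a.1 ≤ b.1) := by
  induction ps with
  | nil => simp
  | cons i t ih =>
    rw [List.flatMap_cons, List.pairwise_append]
    refine ⟨?_, ih (List.pairwise_cons.1 hps).2 (fun j hj => hg j (List.mem_cons_of_mem _ hj)), ?_⟩
    · apply List.pairwise_of_forall_mem_list
      intro a ha b hb
      rw [hg i List.mem_cons_self a ha, hg i List.mem_cons_self b hb]
    · intro a ha b hb
      obtain ⟨j, hj, hbj⟩ := List.mem_flatMap.1 hb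
      rw [hg i List.mem_cons_self a ha, hg j (List.mem_cons_of_mem _ hj) b hbj]
      exact le_of_lt ((List.pairwise_cons.1 hps).1 j hj)

lemma pv_len_lower (s : String) : (PySem.Str.lower s).toList.length = s.toList.length := by
  simp [PySem.Str.toList_lower, PySem.Chars.lower]

-- A's keyword loop, iterated over the keyword list
lemma pv_A_outer (tl : List Char) (fuel : Nat) (hf : tl.length + 2 ≤ fuel) :
    ∀ (ks : List String) (acc : List (Int × Int × String)),
      ks.foldl (fun acc kw => pvKwLoop tl ((PySem.Str.lower kw).toList) kw fuel 0 acc) acc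
        = acc ++ ks.flatMap (fun kw => (pvOcc tl ((PySem.Str.lower kw).toList) 0).map (pvEntry kw)) := by
  intro ks
  induction ks with
  | nil => intro acc; simp
  | cons kw t ih =>
    intro acc
    rw [List.foldl_cons,
        pv_kwLoop_eq tl _ kw fuel 0 acc (le_refl 0) (by simpa using hf),
        ih, List.flatMap_cons, List.append_assoc]

-- A's matches list, keyword-major
lemma pv_A_eq (text : String) (keywords : List String) :
    extract_keywords_from_text text keywords =
      PySem.List.sorted
        (keywords.flatMap (fun kw =>
          (pvOcc (PySem.Str.lower text).toList ((PySem.Str.lower kw).toList) 0).map (pvEntry kw)))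
        (fun x => x.1) := by
  rw [show extract_keywords_from_text text keywords =
      PySem.List.sorted
        (keywords.foldl
          (fun acc kw => pvKwLoop (PySem.Str.lower text).toList ((PySem.Str.lower kw).toList) kw
            (text.toList.length + 2) 0 acc) [])
        (fun x => x.1) from rfl]
  rw [pv_A_outer _ _ (by rw [pv_len_lower]) keywords [], List.nil_append]

-- B's inner loop over the (lowered, original) keyword pairs
lemma pv_B_inner (tl : List Char) (i : Int) :
    ∀ (ks : List String) (acc : List (Int × Int × String)),
      (ks.map (fun kw => ((PySem.Str.lower kw).toList, kw))).foldl
        (fun acc2 p =>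
          if PySem.Chars.startswith (tl.drop i.toNat) p.1
          then acc2 ++ [(i, i + PySem.Str.len p.2, p.2)] else acc2) acc
      = acc ++ (ks.filter (fun kw =>
          PySem.Chars.startswith (tl.drop i.toNat) ((PySem.Str.lower kw).toList))).map
          (fun kw => pvEntry kw i) := by
  intro ks
  induction ks with
  | nil => intro acc; simp
  | cons kw t ih =>
    intro acc
    simp only [PySem.Str.toList_lower, PySem.Str.len_eq] at ih
    simp only [List.map_cons, List.foldl_cons, List.filter_cons, PySem.Str.toList_lower,
      PySem.Str.len_eq]
    rw [ih]
    by_cases h : PySem.Chars.startswith (tl.drop i.toNat) (PySem.Chars.lower kw.toList) = true <;>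
      simp [h, pvEntry]

-- B's outer loop over the positions
lemma pv_B_outer (tl : List Char) (keywords : List String) :
    ∀ (ps : List Int) (acc : List (Int × Int × String)),
      ps.foldl (fun acc i =>
        (keywords.map (fun kw => ((PySem.Str.lower kw).toList, kw))).foldl
          (fun acc2 p =>
            if PySem.Chars.startswith (tl.drop i.toNat) p.1
            then acc2 ++ [(i, i + PySem.Str.len p.2, p.2)] else acc2) acc) acc
      = acc ++ ps.flatMap (fun i => (keywords.filter (fun kw =>
          PySem.Chars.startswith (tl.drop i.toNat) ((PySem.Str.lower kw).toList))).map
          (fun kw => pvEntry kw i)) := by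
  intro ps
  induction ps with
  | nil => intro acc; simp
  | cons i t ih =>
    intro acc
    rw [List.foldl_cons, pv_B_inner tl i keywords acc, ih, List.flatMap_cons, List.append_assoc]

-- B's matches list, position-major
lemma pv_B_eq (text : String) (keywords : List String) :
    extract_keywords_from_text_alt text keywords =
      (PySem.List.pyRange 0 (((PySem.Str.lower text).toList.length : Int) + 1)).flatMap
        (fun i => (keywords.filter (fun kw =>
            PySem.Chars.startswith ((PySem.Str.lower text).toList.drop i.toNat)
              ((PySem.Str.lower kw).toList))).map
          (fun kw => pvEntry kw i)) := by
  rw [pv_len_lower]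
  rw [show extract_keywords_from_text_alt text keywords =
      (PySem.List.pyRange 0 ((text.toList.length : Int) + 1)).foldl
        (fun acc i =>
          (keywords.map (fun kw => ((PySem.Str.lower kw).toList, kw))).foldl
            (fun acc2 p =>
              if PySem.Chars.startswith ((PySem.Str.lower text).toList.drop i.toNat) p.1
              then acc2 ++ [(i, i + PySem.Str.len p.2, p.2)] else acc2) acc) [] from rfl]
  rw [pv_B_outer (PySem.Str.lower text).toList keywords _ [], List.nil_append]

-- the two fibers at any key v coincide
lemma pv_fibers_eq (text : String) (keywords : List String) (v : Int) :
    (keywords.flatMap (fun kw =>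
        (pvOcc (PySem.Str.lower text).toList ((PySem.Str.lower kw).toList) 0).map (pvEntry kw))).filter
      (fun y => decide (y.1 = v))
    = ((PySem.List.pyRange 0 (((PySem.Str.lower text).toList.length : Int) + 1)).flatMap
        (fun i => (keywords.filter (fun kw =>
            PySem.Chars.startswith ((PySem.Str.lower text).toList.drop i.toNat)
              ((PySem.Str.lower kw).toList))).map
          (fun kw => pvEntry kw i))).filter (fun y => decide (y.1 = v)) := by
  have htl : ∀ kw : String,
      v ∈ pvOcc (PySem.Str.lower text).toList ((PySem.Str.lower kw).toList) 0 ↔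
        (v ∈ PySem.List.pyRange 0 ((((PySem.Str.lower text).toList.length : Int)) + 1) ∧
         PySem.Chars.startswith ((PySem.Str.lower text).toList.drop v.toNat)
           ((PySem.Str.lower kw).toList) = true) := by
    intro kw
    unfold pvOcc
    rw [List.mem_filter]
  rw [List.filter_flatMap, List.filter_flatMap]
  rw [List.flatMap_congr (l := keywords)
    (g := fun kw =>
      if v ∈ PySem.List.pyRange 0 ((((PySem.Str.lower text).toList.length : Int)) + 1) ∧
         PySem.Chars.startswith ((PySem.Str.lower text).toList.drop v.toNat)
           ((PySem.Str.lower kw).toList) = true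
      then [pvEntry kw v] else [])
    (by
      intro kw _
      show _ = if v ∈ PySem.List.pyRange 0 ((((PySem.Str.lower text).toList.length : Int)) + 1) ∧
          PySem.Chars.startswith ((PySem.Str.lower text).toList.drop v.toNat)
            ((PySem.Str.lower kw).toList) = true
        then [pvEntry kw v] else []
      rw [List.filter_map]
      have hp : ((fun y : Int × Int × String => decide (y.1 = v)) ∘ pvEntry kw)
          = fun i => decide (i = v) := by
        funext i; simp [pvEntry]
      have hnd : (pvOcc (PySem.Str.lower text).toList ((PySem.Str.lower kw).toList) 0).Nodup := by
        unfold pvOcc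
        exact List.Nodup.filter _ (PySem.List.nodup_pyRange_one _ _)
      rw [hp, pv_nodup_filter_eq _ v hnd]
      by_cases hc : v ∈ PySem.List.pyRange 0 ((((PySem.Str.lower text).toList.length : Int)) + 1) ∧
          PySem.Chars.startswith ((PySem.Str.lower text).toList.drop v.toNat)
            ((PySem.Str.lower kw).toList) = true
      · rw [if_pos ((htl kw).2 hc), if_pos hc]; rfl
      · rw [if_neg (fun hm => hc ((htl kw).1 hm)), if_neg hc]; rfl)]
  rw [List.flatMap_congr (l := PySem.List.pyRange 0 ((((PySem.Str.lower text).toList.length : Int)) + 1))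
    (g := fun i =>
      if i = v
      then (keywords.filter (fun kw =>
          PySem.Chars.startswith ((PySem.Str.lower text).toList.drop i.toNat)
            ((PySem.Str.lower kw).toList))).map (fun kw => pvEntry kw i)
      else [])
    (by
      intro i _
      show _ = if i = v
        then (keywords.filter (fun kw =>
            PySem.Chars.startswith ((PySem.Str.lower text).toList.drop i.toNat)
              ((PySem.Str.lower kw).toList))).map (fun kw => pvEntry kw i)
        else []
      by_cases hiv : i = v
      · subst hiv
        rw [if_pos rfl]
        apply List.filter_eq_self.2
        intro y hy
        obtain ⟨kw, _, rfl⟩ := List.mem_map.1 hy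
        simp [pvEntry]
      · rw [if_neg hiv]
        apply List.filter_eq_nil_iff.2
        intro y hy
        obtain ⟨kw, _, rfl⟩ := List.mem_map.1 hy
        simp [pvEntry, hiv])]
  rw [pv_flatMap_if _ v (PySem.List.nodup_pyRange_one _ _)]
  by_cases hv : v ∈ PySem.List.pyRange 0 ((((PySem.Str.lower text).toList.length : Int)) + 1)
  · rw [if_pos hv]
    rw [List.flatMap_congr (l := keywords)
      (g := fun kw =>
        if PySem.Chars.startswith ((PySem.Str.lower text).toList.drop v.toNat)
            ((PySem.Str.lower kw).toList) = true
        then [pvEntry kw v] else [])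
      (by
        intro kw _
        show _ = if PySem.Chars.startswith ((PySem.Str.lower text).toList.drop v.toNat)
            ((PySem.Str.lower kw).toList) = true
          then [pvEntry kw v] else []
        by_cases hsw : PySem.Chars.startswith ((PySem.Str.lower text).toList.drop v.toNat)
            ((PySem.Str.lower kw).toList) = true
        · rw [if_pos ⟨hv, hsw⟩, if_pos hsw]
        · rw [if_neg (fun hc => hsw hc.2), if_neg hsw])]
    rw [pv_flatMap_ite_singleton]
    simp
  · rw [if_neg hv]
    rw [List.flatMap_congr (l := keywords) (g := fun _ => ([] : List (Int × Int × String)))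
      (by
        intro kw _
        show _ = ([] : List (Int × Int × String))
        rw [if_neg (fun hc => hv hc.1)])]
    simp

-- ===== VERDICT (by name: the statement is the Claim_ definition above) =====
theorem extract_keywords_from_text_spec : Claim_equal_extract_keywords_from_text := by
  intro text keywords _
  unfold Spec_extract_keywords_from_text
  rw [pv_A_eq, pv_B_eq]
  apply pv_eq_of_filter
  · exact PySem.List.sorted_pairwise _ _
  · apply pv_pairwise_flatMap
    · exact PySem.List.pairwise_lt_pyRange_one _ _
    · intro i _ x hx
      obtain ⟨kw, _, hkw⟩ := List.mem_map.1 hx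
      rw [← hkw]; rfl
  · intro v
    rw [pv_sorted_filter]
    exact pv_fibers_eq text keywords v
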